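-- pv_equiv track=rewrite | github.com/digi-gen/Code-Solutions | Quera/Mid-level/175884/175884_1.py | calculate_floor
-- ===== SOURCE A (Python) =====
-- def calculate_floor(string):
--     floor = 0
--     for i in string:
--         if i == 'U':
--             floor += 1
--         else:
--             floor -= 1
--
--     return floor
-- ===== SOURCE B (Python) =====
-- def calculate_floor(string):
--     return 2 * string.count('U') - len(string)
-- ===== Notes on version B (the rewrite author's own statement) =====
-- stated objective: simpler
-- what changed: Replaced the explicit loop-and-accumulator with a closed-form expression: 2*count('U') - len(string), since every non-'U' character contributes -1.
import Mathlib
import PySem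

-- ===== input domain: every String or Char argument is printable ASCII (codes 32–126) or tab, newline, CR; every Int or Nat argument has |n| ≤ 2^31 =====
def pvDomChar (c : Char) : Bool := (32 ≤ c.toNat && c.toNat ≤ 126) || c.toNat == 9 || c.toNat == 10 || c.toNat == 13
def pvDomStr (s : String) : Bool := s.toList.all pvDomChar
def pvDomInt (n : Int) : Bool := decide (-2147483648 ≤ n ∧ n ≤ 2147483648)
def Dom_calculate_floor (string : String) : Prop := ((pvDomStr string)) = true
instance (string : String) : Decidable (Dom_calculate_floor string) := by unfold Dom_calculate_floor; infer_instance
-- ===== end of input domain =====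

-- B replaces A's loop-and-accumulator with the closed form 2*count('U') - len (simpler).
-- ===== PORT A =====
def calculate_floor (string : String) : Int :=
  string.toList.foldl (fun floor i => if i == 'U' then floor + 1 else floor - 1) 0

-- ===== PORT B =====
def calculate_floor_alt (string : String) : Int :=
  2 * (PySem.Str.count string "U" : Int) - (PySem.Str.len string : Int)

-- ===== PRECONDITION & SPEC =====
def Spec_calculate_floor (string : String) (out : Int) : Prop := out = calculate_floor_alt string
instance (string : String) (out : Int) : Decidable (Spec_calculate_floor string out) := by unfold Spec_calculate_floor; infer_instance

-- ===== CLAIM (what is proved, stated in full; the proofs are below) =====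
def Claim_equal_calculate_floor : Prop := ∀ (string : String), Dom_calculate_floor string → Spec_calculate_floor string (calculate_floor string)

-- ===== LEMMAS AND PROOFS =====

-- count.go with a single-character pattern is List.count (given enough fuel)
theorem count_go_single (c : Char) (l : List Char) : ∀ (fuel acc : Nat),
    l.length ≤ fuel → PySem.Chars.count.go [c] fuel l acc = acc + l.count c := by
  induction l with
  | nil =>
    intro fuel acc _
    cases fuel <;> simp [PySem.Chars.count.go]
  | cons h t ih =>
    intro fuel acc hle
    cases fuel with
    | zero => simp at hle
    | succ n =>
      have hn : t.length ≤ n := by simpa using hle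
      by_cases hc : h = c
      · simp [PySem.Chars.count.go, hc, List.isPrefixOf, ih n (acc + 1) hn]
        omega
      · have : List.isPrefixOf [c] (h :: t) = false := by
          simp [List.isPrefixOf]
          exact fun e => hc e.symm
        simp [PySem.Chars.count.go, this, ih n acc hn, hc]

theorem chars_count_single (c : Char) (cs : List Char) :
    PySem.Chars.count cs [c] = cs.count c := by
  simp [PySem.Chars.count, count_go_single c cs cs.length 0 le_rfl]

theorem foldl_ud (l : List Char) : ∀ (a : Int),
    l.foldl (fun floor i => if i == 'U' then floor + 1 else floor - 1) a
      = a + 2 * (l.count 'U' : Int) - (l.length : Int) := by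
  induction l with
  | nil => intro a; simp
  | cons h t ih =>
    intro a
    rw [List.foldl_cons]
    by_cases hc : h = 'U'
    · rw [if_pos (by simp [hc]), ih]
      simp [hc]; ring
    · rw [if_neg (by simp [hc]), ih]
      simp [hc]; ring

-- ===== VERDICT (by name: the statement is the Claim_ definition above) =====
theorem calculate_floor_spec : Claim_equal_calculate_floor := by
  intro s _
  unfold Spec_calculate_floor calculate_floor calculate_floor_alt
  rw [foldl_ud]
  simp [PySem.Str.count, chars_count_single, PySem.Str.len]
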